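-- pv_equiv track=rewrite | github.com/jianningzhuang/CS1010X-Programming_Methodology | extra Prac Exams/cs1010s-repractical-apr16-template.py | num_swaps
-- ===== SOURCE A (Python) =====
-- def num_swaps(candies):
--     max = None
--     seen = []
--     for candy in candies:
--         if candy not in seen:
--             seen.append(candy)
--             if max == None or candies.count(candy) > max:
--                 max = candies.count(candy)
--     return len(candies) - max
-- ===== SOURCE B (Python) =====
-- def num_swaps(candies):
--     best = 0
--     rest = candies
--     while rest:
--         x = rest[0]
--         smaller = [y for y in rest if y != x]
--         best = max(best, len(rest) - len(smaller))
--         rest = smaller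
--     return len(candies) - best
-- ===== Notes on version B (the rewrite author's own statement) =====
-- stated objective: alternative
-- what changed: Replaces A's seen-list with repeated candies.count scans by a repeated-partition loop: peel off all copies of the current head at once, measuring each value's frequency as the length drop of the filtered remainder, so no membership test and no count() call remain.
import Mathlib
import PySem

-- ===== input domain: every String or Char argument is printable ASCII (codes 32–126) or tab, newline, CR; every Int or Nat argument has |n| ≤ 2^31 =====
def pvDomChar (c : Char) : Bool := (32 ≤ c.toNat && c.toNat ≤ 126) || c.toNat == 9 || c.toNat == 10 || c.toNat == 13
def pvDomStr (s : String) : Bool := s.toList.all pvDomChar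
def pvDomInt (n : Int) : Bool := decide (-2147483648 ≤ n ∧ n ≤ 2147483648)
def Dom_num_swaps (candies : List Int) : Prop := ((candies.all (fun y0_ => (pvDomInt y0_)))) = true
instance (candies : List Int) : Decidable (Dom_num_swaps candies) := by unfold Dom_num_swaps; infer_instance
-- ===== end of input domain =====

-- B replaces A's seen-list and repeated candies.count scans by a repeated-partition loop (peel all copies of the head, frequency = length drop); alternative algorithm, similar cost.


-- ===== PORT A =====
-- one step of A's loop body ('for candy in candies: …'), state = (max, seen)
def nsStepA (candies : List Int) (st : Option Int × List Int) (candy : Int) : Option Int × List Int :=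
  if candy ∈ st.2 then st
  else
    match st.1 with
    | none => (some (PySem.List.count candies candy : Int), st.2 ++ [candy])
    | some v =>
        if (PySem.List.count candies candy : Int) > v then
          (some (PySem.List.count candies candy : Int), st.2 ++ [candy])
        else (some v, st.2 ++ [candy])

def num_swaps (candies : List Int) : Int :=
  match (candies.foldl (nsStepA candies) (none, [])).1 with
  | some m => (candies.length : Int) - m
  | none => 0  -- Python raises TypeError here (len(candies) - None); excluded by Pre_

-- ===== PORT B =====
-- Source B's while loop: state = (best, rest); each turn filters out all copies of rest[0].
-- fuel = initial rest.length only makes the recursion structural; it is never exhausted.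
def nsLoop (fuel : Nat) (best : Int) (rest : List Int) : Int :=
  match fuel, rest with
  | _, [] => best
  | 0, _ :: _ => best
  | fuel + 1, x :: t =>
      nsLoop fuel
        (max best (((x :: t).length : Int) - (((x :: t).filter (fun y => y != x)).length : Int)))
        ((x :: t).filter (fun y => y != x))

def num_swaps_alt (candies : List Int) : Int :=
  (candies.length : Int) - nsLoop candies.length 0 candies

-- ===== PRECONDITION & SPEC =====
-- Pre_ excludes only the empty list, on which A raises TypeError (len(candies) - None).
def Pre_num_swaps (candies : List Int) : Prop := candies ≠ []
instance (candies : List Int) : Decidable (Pre_num_swaps candies) := by unfold Pre_num_swaps; infer_instance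
def pvWitness_num_swaps : List Int := [1, 2, 2]

def Spec_num_swaps (candies : List Int) (out : Int) : Prop := out = num_swaps_alt candies
instance (candies : List Int) (out : Int) : Decidable (Spec_num_swaps candies out) := by unfold Spec_num_swaps; infer_instance

-- ===== CLAIM (what is proved, stated in full; the proofs are below) =====
def Claim_equal_num_swaps : Prop := ∀ (candies : List Int), Dom_num_swaps candies → Pre_num_swaps candies → Spec_num_swaps candies (num_swaps candies)

-- ===== LEMMAS AND PROOFS =====

-- ---- A side: the fold computes max? of the counts of the first occurrences ----

-- the sublist of l of first occurrences of elements not already in s, in order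
def nsNew : List Int → List Int → List Int
  | [], _ => []
  | x :: l, s => if x ∈ s then nsNew l s else x :: nsNew l (s ++ [x])

-- A's running-max update, abstracted over the count function f
def nsComb (f : Int → Int) (m : Option Int) (x : Int) : Option Int :=
  match m with
  | none => some (f x)
  | some v => if f x > v then some (f x) else some v

theorem nsStepA_eq (candies : List Int) (mx : Option Int) (s : List Int) (x : Int) :
    nsStepA candies (mx, s) x
      = if x ∈ s then (mx, s)
        else (nsComb (fun y => (PySem.List.count candies y : Int)) mx x, s ++ [x]) := by
  cases mx with
  | none => by_cases hx : x ∈ s <;> simp [nsStepA, nsComb, hx]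
  | some v =>
      by_cases hx : x ∈ s
      · simp [nsStepA, hx]
      · simp only [nsStepA, nsComb, hx, if_false]
        split_ifs <;> simp

theorem nsFoldA (candies : List Int) :
    ∀ (l : List Int) (mx : Option Int) (s : List Int),
      l.foldl (nsStepA candies) (mx, s)
        = ((nsNew l s).foldl (nsComb (fun x => (PySem.List.count candies x : Int))) mx,
           s ++ nsNew l s) := by
  intro l
  induction l with
  | nil => intro mx s; simp [nsNew]
  | cons x l ih =>
      intro mx s
      rw [List.foldl_cons, nsStepA_eq]
      by_cases hx : x ∈ s
      · simp [hx, nsNew, ih]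
      · simp [hx, nsNew, ih, List.append_assoc]

theorem nsNew_mem : ∀ (l s : List Int) (x : Int), x ∈ nsNew l s ↔ x ∈ l ∧ x ∉ s := by
  intro l
  induction l with
  | nil => intro s x; simp [nsNew]
  | cons y l ih =>
      intro s x
      by_cases hy : y ∈ s
      · rw [nsNew, if_pos hy, ih]
        by_cases hxy : x = y
        · subst hxy; simp [hy]
        · simp [hxy]
      · rw [nsNew, if_neg hy]
        by_cases hxy : x = y
        · subst hxy; simp [hy]
        · simp only [List.mem_cons, hxy, false_or, ih, List.mem_append]
          tauto

theorem nsComb_some (f : Int → Int) :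
    ∀ (t : List Int) (a : Int),
      t.foldl (nsComb f) (some a) = some (t.foldl (fun v y => max v (f y)) a) := by
  intro t
  induction t with
  | nil => intro a; rfl
  | cons y t ih =>
      intro a
      have h : nsComb f (some a) y = some (max a (f y)) := by
        simp only [nsComb]
        split_ifs with h
        · simp [max_def]; omega
        · simp [max_def]; omega
      simp [List.foldl_cons, h, ih]

theorem nsFold_eq_max? (f : Int → Int) (l : List Int) :
    l.foldl (nsComb f) none = PySem.List.max? (l.map f) (fun v => v) := by
  cases l with
  | nil =>
      symm
      simp only [List.map_nil, List.foldl_nil]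
      rw [PySem.List.max?_eq_none_iff]
  | cons x t =>
      simp only [List.foldl_cons, List.map_cons]
      have h1 : nsComb f none x = some (f x) := rfl
      rw [h1, nsComb_some, PySem.List.max?_id_cons, List.foldl_map]

-- ---- B side: the partition loop bounds and attains the counts ----

theorem nsLenSplit (p : Int → Bool) (l : List Int) :
    l.countP p + l.countP (fun a => !p a) = l.length := by
  induction l with
  | nil => simp
  | cons a t ih => by_cases h : p a <;> simp [h, ← ih] <;> omega

-- frequency of the peeled head = length drop of the filtered remainder
theorem nsCountHead (x : Int) (l : List Int) :
    (List.count x l : Int) = (l.length : Int) - ((l.filter (fun y => y != x)).length : Int) := by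
  have h : l.countP (fun y => y == x) + l.countP (fun a => !(a == x)) = l.length :=
    nsLenSplit (fun y => y == x) l
  have hc : List.count x l = l.countP (fun y => y == x) := rfl
  have hf : (l.filter (fun y => y != x)).length = l.countP (fun y => y != x) :=
    List.countP_eq_length_filter.symm
  have he : l.countP (fun y => y != x) = l.countP (fun a => !(a == x)) := by
    apply List.countP_congr; intro a _; simp [bne]
  rw [hc, hf, he]; omega

-- counts of the other values survive the partition step
theorem nsCountFilter (x z : Int) (l : List Int) (h : z ≠ x) :
    List.count z (l.filter (fun y => y != x)) = List.count z l :=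
  List.count_filter (by simp [h])

theorem nsSmallerLe (x : Int) (t : List Int) :
    ((x :: t).filter (fun y => y != x)).length ≤ t.length := by
  simp only [List.filter_cons, bne_self_eq_false, Bool.false_eq_true, if_false]
  exact List.length_filter_le _ _

theorem nsLoop_ge : ∀ (fuel : Nat) (best : Int) (rest : List Int), rest.length ≤ fuel →
    best ≤ nsLoop fuel best rest ∧
      ∀ y ∈ rest, (List.count y rest : Int) ≤ nsLoop fuel best rest := by
  intro fuel
  induction fuel with
  | zero =>
      intro best rest h
      have : rest = [] := List.eq_nil_of_length_eq_zero (Nat.le_zero.mp h)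
      subst this
      exact ⟨le_refl _, by simp⟩
  | succ n ih =>
      intro best rest h
      cases rest with
      | nil => exact ⟨le_refl _, by simp⟩
      | cons x t =>
          have hs : ((x :: t).filter (fun y => y != x)).length ≤ n :=
            le_trans (nsSmallerLe x t) (by simpa using h)
          rw [nsLoop]
          obtain ⟨ih1, ih2⟩ := ih _ _ hs
          refine ⟨le_trans (le_max_left _ _) ih1, ?_⟩
          intro y hy
          by_cases hyx : y = x
          · subst hyx
            calc (List.count y (y :: t) : Int)
                = ((y :: t).length : Int) - (((y :: t).filter (fun z => z != y)).length : Int) :=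
                  nsCountHead y (y :: t)
              _ ≤ max best _ := le_max_right _ _
              _ ≤ _ := ih1
          · have hmem : y ∈ (x :: t).filter (fun z => z != x) :=
              List.mem_filter.mpr ⟨hy, by simp [hyx]⟩
            have := ih2 y hmem
            rwa [nsCountFilter x y (x :: t) hyx] at this

theorem nsLoop_attained : ∀ (fuel : Nat) (best : Int) (rest : List Int), rest.length ≤ fuel →
    nsLoop fuel best rest = best ∨
      ∃ y ∈ rest, nsLoop fuel best rest = (List.count y rest : Int) := by
  intro fuel
  induction fuel with
  | zero =>
      intro best rest h
      have : rest = [] := List.eq_nil_of_length_eq_zero (Nat.le_zero.mp h)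
      subst this
      exact Or.inl rfl
  | succ n ih =>
      intro best rest h
      cases rest with
      | nil => exact Or.inl rfl
      | cons x t =>
          have hs : ((x :: t).filter (fun y => y != x)).length ≤ n :=
            le_trans (nsSmallerLe x t) (by simpa using h)
          rw [nsLoop]
          rcases ih (max best
              (((x :: t).length : Int) - (((x :: t).filter (fun y => y != x)).length : Int)))
              _ hs with hcase | ⟨y, hy, hcase⟩
          · rcases max_cases best
                (((x :: t).length : Int) - (((x :: t).filter (fun y => y != x)).length : Int)) with
              ⟨he, _⟩ | ⟨he, _⟩
            · exact Or.inl (hcase.trans he)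
            · refine Or.inr ⟨x, List.mem_cons_self, ?_⟩
              rw [hcase, he]
              exact (nsCountHead x (x :: t)).symm
          · have hyx : y ≠ x := by
              have := (List.mem_filter.mp hy).2; simpa using this
            refine Or.inr ⟨y, (List.mem_filter.mp hy).1, ?_⟩
            rw [hcase, nsCountFilter x y (x :: t) hyx]

-- ===== VERDICT (by name: the statement is the Claim_ definition above) =====
theorem num_swaps_spec : Claim_equal_num_swaps := by
  intro candies _ hpre
  unfold Spec_num_swaps num_swaps num_swaps_alt
  rw [nsFoldA]
  simp only
  rw [nsFold_eq_max?]
  have hmemN : ∀ x, x ∈ nsNew candies [] ↔ x ∈ candies := by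
    intro x; rw [nsNew_mem]; simp
  cases hm : PySem.List.max? ((nsNew candies []).map
      (fun x => (PySem.List.count candies x : Int))) (fun v => v) with
  | none =>
      rw [PySem.List.max?_eq_none_iff] at hm
      cases hcand : candies with
      | nil => exact absurd hcand hpre
      | cons a t =>
          exfalso
          have ha : a ∈ nsNew candies [] := (hmemN a).mpr (by rw [hcand]; exact List.mem_cons_self)
          have : (PySem.List.count candies a : Int) ∈
              (nsNew candies []).map (fun x => (PySem.List.count candies x : Int)) :=
            List.mem_map.mpr ⟨a, ha, rfl⟩
          rw [hm] at this; simp at this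
  | some m =>
      show (candies.length : Int) - m
          = (candies.length : Int) - nsLoop candies.length 0 candies
      have h1 : m ≤ nsLoop candies.length 0 candies := by
        rcases List.mem_map.mp (PySem.List.max?_mem hm) with ⟨x, hx, he⟩
        have hxc : x ∈ candies := (hmemN x).mp hx
        have hle := (nsLoop_ge candies.length 0 candies (le_refl _)).2 x hxc
        have he' : (List.count x candies : Int) = m := by
          simpa [PySem.List.count] using he
        omega
      have h2 : nsLoop candies.length 0 candies ≤ m := by
        rcases nsLoop_attained candies.length 0 candies (le_refl _) with hcase | ⟨y, hy, hcase⟩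
        · have h1p : (0 : Int) < m := by
            rcases List.mem_map.mp (PySem.List.max?_mem hm) with ⟨x, hx, he⟩
            have hxc : x ∈ candies := (hmemN x).mp hx
            have hp : 0 < List.count x candies := List.count_pos_iff.mpr hxc
            have hp' : (0 : Int) < (List.count x candies : Int) := by exact_mod_cast hp
            have he' : (List.count x candies : Int) = m := by
              simpa [PySem.List.count] using he
            omega
          omega
        · have hmy : (PySem.List.count candies y : Int) ∈
              (nsNew candies []).map (fun x => (PySem.List.count candies x : Int)) :=
            List.mem_map.mpr ⟨y, (hmemN y).mpr hy, rfl⟩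
          have hle := PySem.List.max?_isMax hm _ hmy
          have hle' : (List.count y candies : Int) ≤ m := by
            simpa [PySem.List.count] using hle
          omega
      omega
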